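-- pv_equiv track=rewrite | github.com/Rshei/GenAI-Projects-trade-analysis | analyze_trade_history.py | select_latest_per_snapshot
-- ===== SOURCE A (Python) =====
-- from typing import Dict, List
--
-- def select_latest_per_snapshot(reports: List[Dict]) -> List[Dict]:
--     latest: Dict[str, Dict] = {}
--
--     for r in reports:
--         key = r.get("source_snapshot_as_of")
--         if not key:
--             continue
--         existing = latest.get(key)
--         if existing is None or r.get("evaluated_at", "") > existing.get("evaluated_at", ""):
--             latest[key] = r
--
--     return list(latest.values())
-- ===== SOURCE B (Python) =====
-- from typing import Dict, List
--
-- def select_latest_per_snapshot(reports: List[Dict]) -> List[Dict]: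
--     groups: Dict[str, List[Dict]] = {}
--     for r in reports:
--         key = r.get("source_snapshot_as_of")
--         if not key:
--             continue
--         groups.setdefault(key, []).append(r)
--     return [max(g, key=lambda r: r.get("evaluated_at", "")) for g in groups.values()]
-- ===== Notes on version B (the rewrite author's own statement) =====
-- stated objective: alternative
-- what changed: B groups reports by snapshot key into an insertion-ordered dict of lists in one pass, then picks max(group, key=evaluated_at) per group, instead of A's running keep-the-latest comparison inside the loop.
import Mathlib
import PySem

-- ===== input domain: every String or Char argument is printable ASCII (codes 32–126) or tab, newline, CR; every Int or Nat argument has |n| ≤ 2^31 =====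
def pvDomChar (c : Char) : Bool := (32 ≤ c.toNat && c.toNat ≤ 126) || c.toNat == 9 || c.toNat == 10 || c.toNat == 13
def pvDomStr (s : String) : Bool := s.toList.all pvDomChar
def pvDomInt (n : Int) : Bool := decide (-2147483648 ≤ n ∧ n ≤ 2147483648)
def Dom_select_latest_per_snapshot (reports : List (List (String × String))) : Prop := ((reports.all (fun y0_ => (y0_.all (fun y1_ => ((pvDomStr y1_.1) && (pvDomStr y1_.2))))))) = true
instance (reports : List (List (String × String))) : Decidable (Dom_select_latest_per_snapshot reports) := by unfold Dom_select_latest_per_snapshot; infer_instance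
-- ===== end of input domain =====

-- One honest line: B groups the reports per snapshot key into an ordered dict of lists and then
-- takes the (first-maximal) max of each group by evaluated_at, instead of A's in-loop running
-- update; same cost, different decomposition.

-- ===== PORT A =====
-- shared helper: r.get(k) on a report dict (association list, first match)
def pvGet (r : List (String × String)) (k : String) : Option String :=
  (PySem.Dict.mk r).get? k

-- shared helper: r.get(k, d)
def pvGetD (r : List (String × String)) (k : String) (d : String) : String :=
  (PySem.Dict.mk r).getD k d

def select_latest_per_snapshot (reports : List (List (String × String))) : List (List (String × String)) :=
  (reports.foldl
    (fun (latest : PySem.Dict String (List (String × String))) r =>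
      match pvGet r "source_snapshot_as_of" with
      | none => latest                                  -- key is None: continue
      | some key =>
        if key = "" then latest                         -- key falsy: continue
        else
          match latest.get? key with
          | none => latest.insert key r
          | some existing =>
            if pvGetD existing "evaluated_at" "" < pvGetD r "evaluated_at" ""
            then latest.insert key r
            else latest)
    PySem.Dict.empty).values

-- ===== PORT B =====
def select_latest_per_snapshot_alt (reports : List (List (String × String))) : List (List (String × String)) :=
  let groups : PySem.Dict String (List (List (String × String))) :=
    reports.foldl
      (fun g r =>
        match pvGet r "source_snapshot_as_of" with
        | none => g
        | some key =>
          if key = "" then g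
          else g.modify key [] (· ++ [r]))              -- groups.setdefault(key, []).append(r)
      PySem.Dict.empty
  groups.values.map (fun grp => PySem.List.maxD grp (fun r => pvGetD r "evaluated_at" "") [])

-- ===== PRECONDITION & SPEC =====
def Spec_select_latest_per_snapshot (reports : List (List (String × String))) (out : List (List (String × String))) : Prop := out = select_latest_per_snapshot_alt reports
instance (reports : List (List (String × String))) (out : List (List (String × String))) : Decidable (Spec_select_latest_per_snapshot reports out) := by unfold Spec_select_latest_per_snapshot; infer_instance

-- ===== CLAIM (what is proved, stated in full; the proofs are below) =====
def Claim_equal_select_latest_per_snapshot : Prop := ∀ (reports : List (List (String × String))), Dom_select_latest_per_snapshot reports → Spec_select_latest_per_snapshot reports (select_latest_per_snapshot reports)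

-- ===== LEMMAS AND PROOFS =====

def pvKeyf (r : List (String × String)) : String := pvGetD r "evaluated_at" ""

def pvStepA (latest : PySem.Dict String (List (String × String))) (r : List (String × String)) :
    PySem.Dict String (List (String × String)) :=
  match pvGet r "source_snapshot_as_of" with
  | none => latest
  | some key =>
    if key = "" then latest
    else
      match latest.get? key with
      | none => latest.insert key r
      | some existing =>
        if pvGetD existing "evaluated_at" "" < pvGetD r "evaluated_at" ""
        then latest.insert key r
        else latest

def pvStepB (g : PySem.Dict String (List (List (String × String)))) (r : List (String × String)) :
    PySem.Dict String (List (List (String × String))) :=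
  match pvGet r "source_snapshot_as_of" with
  | none => g
  | some key =>
    if key = "" then g
    else g.modify key [] (· ++ [r])

def pvF (p : String × List (List (String × String))) : String × List (String × String) :=
  (p.1, PySem.List.maxD p.2 pvKeyf [])

-- the invariant linking the two fold accumulators
def pvInv (latest : PySem.Dict String (List (String × String)))
    (g : PySem.Dict String (List (List (String × String)))) : Prop :=
  latest.items = g.items.map pvF ∧ (∀ p ∈ g.items, p.2 ≠ []) ∧ (g.items.map Prod.fst).Nodup

lemma pv_find?_map (l : List (String × List (List (String × String)))) (k : String) :
    List.find? (fun p => p.1 == k) (l.map pvF)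
      = (List.find? (fun p => p.1 == k) l).map pvF := by
  induction l with
  | nil => simp
  | cons h t ih =>
    by_cases hk : h.1 = k
    · simp [pvF, List.find?, hk]
    · rw [List.map_cons, List.find?_cons_of_neg (by simp [pvF, hk]),
        List.find?_cons_of_neg (by simp [hk]), ih]

lemma pv_foldl_isSome {α : Type} (f : Option α → α → Option α)
    (hf : ∀ a x, ∃ b, f (some a) x = some b) (t : List α) (a : α) :
    ∃ m, t.foldl f (some a) = some m := by
  induction t generalizing a with
  | nil => exact ⟨a, rfl⟩
  | cons x t ih =>
    rw [List.foldl_cons]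
    obtain ⟨b, hb⟩ := hf a x
    rw [hb]
    exact ih b

lemma pv_max?_some (g : List (List (String × String))) (hg : g ≠ []) :
    ∃ m, PySem.List.max? g pvKeyf = some m := by
  cases g with
  | nil => exact absurd rfl hg
  | cons x t =>
    unfold PySem.List.max?
    rw [List.foldl_cons]
    exact pv_foldl_isSome _ (fun a x => by dsimp only; split <;> exact ⟨_, rfl⟩) t x

lemma pv_max_append (g : List (List (String × String))) (hg : g ≠ []) (r : List (String × String)) :
    PySem.List.maxD (g ++ [r]) pvKeyf []
      = if pvKeyf (PySem.List.maxD g pvKeyf []) < pvKeyf r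
        then r else PySem.List.maxD g pvKeyf [] := by
  obtain ⟨m, hm⟩ := pv_max?_some g hg
  unfold PySem.List.maxD
  unfold PySem.List.max? at hm ⊢
  rw [List.foldl_append, hm]
  simp only [List.foldl_cons, List.foldl_nil, Option.getD_some]
  by_cases hlt : pvKeyf m < pvKeyf r <;> simp [hlt]

lemma pv_inv_step (latest : PySem.Dict String (List (String × String)))
    (g : PySem.Dict String (List (List (String × String))))
    (r : List (String × String)) (h : pvInv latest g) :
    pvInv (pvStepA latest r) (pvStepB g r) := by
  obtain ⟨hitems, hne, hnd⟩ := h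
  unfold pvStepA pvStepB
  cases hk : pvGet r "source_snapshot_as_of" with
  | none => exact ⟨hitems, hne, hnd⟩
  | some key =>
    by_cases hke : key = ""
    · simp only [if_pos hke]; exact ⟨hitems, hne, hnd⟩
    simp only [if_neg hke]
    have hget : latest.get? key = (g.get? key).map (fun v => PySem.List.maxD v pvKeyf []) := by
      simp only [PySem.Dict.get?, hitems, pv_find?_map]
      cases List.find? (fun p => p.1 == key) g.items <;> simp [pvF]
    have hcont : latest.contains key = g.contains key := by
      simp only [PySem.Dict.contains, hitems, List.any_map]
      rfl
    cases hgk : g.get? key with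
    | none =>
      -- a fresh key: both dicts append at the end
      have hfind : List.find? (fun p => p.1 == key) g.items = none := by
        cases hf : List.find? (fun p => p.1 == key) g.items with
        | none => rfl
        | some q => simp [PySem.Dict.get?, hf] at hgk
      have hgc : g.contains key = false := by
        simp only [PySem.Dict.contains]
        rw [List.any_eq_false]
        intro p hp
        have := List.find?_eq_none.mp hfind p hp
        simpa using this
      have hlget : latest.get? key = none := by simp [hget, hgk]
      refine ⟨?_, ?_, ?_⟩
      · simp [hlget, PySem.Dict.insert, PySem.Dict.modify, PySem.Dict.getD, hgk, hcont, hgc,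
          hitems, pvF, PySem.List.maxD, PySem.List.max?]
      · intro p hp
        rw [show (g.modify key [] (· ++ [r])).items = g.items ++ [(key, [r])] from by
          simp [PySem.Dict.modify, PySem.Dict.insert, hgc, PySem.Dict.getD, hgk]] at hp
        rcases List.mem_append.mp hp with hp | hp
        · exact hne p hp
        · simp only [List.mem_singleton] at hp
          simp [hp]
      · rw [show (g.modify key [] (· ++ [r])).items = g.items ++ [(key, [r])] from by
          simp [PySem.Dict.modify, PySem.Dict.insert, hgc, PySem.Dict.getD, hgk]]
        rw [List.map_append, List.nodup_append]
        refine ⟨hnd, by simp, ?_⟩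
        intro a ha b hb
        simp only [List.map_cons, List.map_nil, List.mem_singleton] at hb
        subst hb
        simp only [List.mem_map] at ha
        obtain ⟨p, hp, hpa⟩ := ha
        have := List.find?_eq_none.mp hfind p hp
        simp only [beq_iff_eq] at this
        subst hpa
        intro hcon; exact this (by simp [hcon])
    | some grp =>
      obtain ⟨q, hqfind⟩ : ∃ q, List.find? (fun p => p.1 == key) g.items = some q := by
        cases hf : List.find? (fun p => p.1 == key) g.items with
        | none => simp [PySem.Dict.get?, hf] at hgk
        | some q => exact ⟨q, rfl⟩
      have hqmem : q ∈ g.items := List.mem_of_find?_eq_some hqfind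
      have hqkey : q.1 = key := by have := List.find?_some hqfind; simpa using this
      have hq2 : q.2 = grp := by simp [PySem.Dict.get?, hqfind] at hgk; exact hgk
      have hgneq : grp ≠ [] := hq2 ▸ hne q hqmem
      have hgc : g.contains key = true := by
        simp only [PySem.Dict.contains, List.any_eq_true]
        exact ⟨q, hqmem, by simp [hqkey]⟩
      -- with nodup keys, any entry with fst = key IS q
      have huniq : ∀ p ∈ g.items, p.1 = key → p = q := by
        intro p hp hpk
        exact List.inj_on_of_nodup_map hnd hp hqmem (by rw [hpk, hqkey])
      have hlget : latest.get? key = some (PySem.List.maxD grp pvKeyf []) := by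
        simp [hget, hgk]
      rw [hlget]
      have hnewmax := pv_max_append grp hgneq r
      have hBitems : (g.modify key [] (· ++ [r])).items
          = g.items.map (fun p => if p.1 == key then (key, grp ++ [r]) else p) := by
        simp [PySem.Dict.modify, PySem.Dict.insert, hgc, PySem.Dict.getD, hgk]
      have hkeysB : (g.modify key [] (· ++ [r])).items.map Prod.fst = g.items.map Prod.fst := by
        rw [hBitems, List.map_map]
        apply List.map_congr_left
        intro p hp
        by_cases hpk : p.1 = key <;> simp [hpk]
      have hneB : ∀ p ∈ (g.modify key [] (· ++ [r])).items, p.2 ≠ [] := by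
        rw [hBitems]
        intro p hp
        simp only [List.mem_map] at hp
        obtain ⟨s, hs, hsp⟩ := hp
        by_cases hsk : s.1 = key
        · simp only [hsk, beq_self_eq_true, if_pos] at hsp
          simp [← hsp]
        · simp only [beq_iff_eq, hsk, if_false] at hsp
          exact hsp ▸ hne s hs
      refine ⟨?_, hneB, by rw [hkeysB]; exact hnd⟩
      by_cases hlt : pvKeyf (PySem.List.maxD grp pvKeyf []) < pvKeyf r
      · -- A overwrites the entry in place; B appends r to the group
        have hltA : pvGetD (PySem.List.maxD grp pvKeyf []) "evaluated_at" "" < pvGetD r "evaluated_at" "" := hlt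
        simp only [if_pos hltA]
        have hAitems : (latest.insert key r).items
            = latest.items.map (fun p => if p.1 == key then (key, r) else p) := by
          simp [PySem.Dict.insert, hcont, hgc]
        rw [hAitems, hitems, List.map_map, hBitems, List.map_map]
        apply List.map_congr_left
        intro p hp
        by_cases hpk : p.1 = key
        · have hpq := huniq p hp hpk
          simp [Function.comp, pvF, hqkey, hnewmax, hlt, hpq, hq2]
        · simp [Function.comp, pvF, hpk]
      · -- A keeps the existing entry; B appends r but the group max is unchanged
        have hltA : ¬ pvGetD (PySem.List.maxD grp pvKeyf []) "evaluated_at" "" < pvGetD r "evaluated_at" "" := hlt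
        simp only [if_neg hltA]
        rw [hitems, hBitems, List.map_map]
        apply List.map_congr_left
        intro p hp
        by_cases hpk : p.1 = key
        · have hpq := huniq p hp hpk
          simp [Function.comp, pvF, hnewmax, hlt, hpq, hq2, hqkey]
        · simp [Function.comp, pvF, hpk]

lemma pv_fold_inv (reports : List (List (String × String)))
    (latest : PySem.Dict String (List (String × String)))
    (g : PySem.Dict String (List (List (String × String))))
    (h : pvInv latest g) :
    pvInv (reports.foldl pvStepA latest) (reports.foldl pvStepB g) := by
  induction reports generalizing latest g with
  | nil => exact h
  | cons r t ih => exact ih _ _ (pv_inv_step latest g r h)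

-- ===== VERDICT (by name: the statement is the Claim_ definition above) =====
theorem select_latest_per_snapshot_spec : Claim_equal_select_latest_per_snapshot := by
  intro reports _
  unfold Spec_select_latest_per_snapshot select_latest_per_snapshot select_latest_per_snapshot_alt
  have h := pv_fold_inv reports PySem.Dict.empty PySem.Dict.empty
    ⟨by simp [PySem.Dict.empty], by simp [PySem.Dict.empty], by simp [PySem.Dict.empty]⟩
  obtain ⟨hitems, -, -⟩ := h
  show (reports.foldl pvStepA PySem.Dict.empty).values
      = ((reports.foldl pvStepB PySem.Dict.empty).values).map
          (fun grp => PySem.List.maxD grp (fun r => pvGetD r "evaluated_at" "") [])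
  simp only [PySem.Dict.values, hitems, List.map_map]
  exact List.map_congr_left (fun p _ => rfl)
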